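-- pv_equiv track=rewrite | github.com/jnguyen1098/code-katas | DMOJ/binary.py | convert
-- ===== SOURCE A (Python) =====
-- def convert(num: int) -> str:
--     """Convert integer to binary, but as a string with groups of 4."""
--     bitstring = bin(num)[2:]
--     digits = len(bitstring) // 4 * 4 + (4 if len(bitstring) % 4 != 0 else 0)
--     final_digits = []
--     for char in reversed(bitstring):
--         final_digits.append(char)
--     for _ in range(digits - len(final_digits)):
--         final_digits.append("0")
--     output = []
--     for idx, char in enumerate(final_digits):
--         output.append(char)
--         if (idx + 1) % 4 == 0:
--             output.append(" ")
--     return "".join(reversed(output)).removeprefix(" ")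
-- ===== SOURCE B (Python) =====
-- def convert(num: int) -> str:
--     """Convert integer to binary, but as a string with groups of 4."""
--     bits = bin(num)[2:]
--     padded = "0" * (-len(bits) % 4) + bits
--     return " ".join(padded[i:i + 4] for i in range(0, len(padded), 4))
-- ===== Notes on version B (the rewrite author's own statement) =====
-- stated objective: simpler
-- what changed: B pads bin(num)[2:] on the left to a multiple of 4 and slices it left-to-right into 4-char groups joined once, instead of A's double reversal with per-character list appends and an index-modulo space insertion followed by a prefix strip.
import Mathlib
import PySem

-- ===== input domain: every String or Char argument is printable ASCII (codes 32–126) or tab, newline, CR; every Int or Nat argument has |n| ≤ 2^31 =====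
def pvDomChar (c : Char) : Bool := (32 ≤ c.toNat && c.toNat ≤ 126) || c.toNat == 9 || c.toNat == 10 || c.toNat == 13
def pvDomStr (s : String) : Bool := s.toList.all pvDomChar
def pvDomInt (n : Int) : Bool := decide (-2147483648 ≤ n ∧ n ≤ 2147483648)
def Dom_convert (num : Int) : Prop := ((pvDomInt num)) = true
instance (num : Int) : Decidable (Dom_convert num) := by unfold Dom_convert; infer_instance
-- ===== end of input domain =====

-- B groups the left-padded bitstring by slicing it left-to-right, instead of A's double reversal
-- with per-character appends and an index-modulo space insertion (objective: simpler).

-- ===== PORT A =====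
-- literal transliteration of A; `len//4` and `digits - len` are on non-negative values, so Nat `/`/`-` are exact
def convert (num : Int) : String :=
  let bitstring := PySem.List.slice (PySem.Int.toBinChars0b num) (some 2) none
  let digits := bitstring.length / 4 * 4 + (if bitstring.length % 4 ≠ 0 then 4 else 0)
  let finalDigits := bitstring.reverse.foldl (fun acc c => acc ++ [c]) ([] : List Char)
  let finalDigits2 := (List.range (digits - finalDigits.length)).foldl (fun acc _ => acc ++ ['0']) finalDigits
  let output := (PySem.List.enumerate finalDigits2).foldl
      (fun acc (p : Int × Char) =>
        let acc2 := acc ++ [p.2]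
        if PySem.Int.mod (p.1 + 1) 4 = 0 then acc2 ++ [' '] else acc2) ([] : List Char)
  let rev := output.reverse
  -- "".join(reversed(output)).removeprefix(" "): drop one leading ' ' if present
  String.mk (if rev.head? = some ' ' then rev.tail else rev)

-- ===== PORT B =====
-- literal transliteration of Source B; '0' * (-len % 4) is List.replicate of the Python-mod value
def convert_alt (num : Int) : String :=
  let bits := PySem.List.slice (PySem.Int.toBinChars0b num) (some 2) none
  let padded := List.replicate (PySem.Int.mod (-(bits.length : Int)) 4).toNat '0' ++ bits
  String.mk (PySem.Chars.join [' ']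
    ((PySem.List.pyRange 0 (padded.length : Int) 4).map
      (fun i => PySem.List.slice padded (some i) (some (i + 4)))))

-- ===== PRECONDITION & SPEC =====
def Spec_convert (num : Int) (out : String) : Prop := out = convert_alt num
instance (num : Int) (out : String) : Decidable (Spec_convert num out) := by unfold Spec_convert; infer_instance

-- ===== CLAIM (what is proved, stated in full; the proofs are below) =====
def Claim_equal_convert : Prop := ∀ (num : Int), Dom_convert num → Spec_convert num (convert num)

-- ===== LEMMAS AND PROOFS =====

-- ceil-chunks of 4 (proof-only helper)
def chunks4 : List Char → List (List Char)
  | [] => []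
  | a :: t => ((a :: t).take 4) :: chunks4 (t.drop 3)
termination_by l => l.length
decreasing_by simp only [List.length_drop, List.length_cons]; omega

theorem foldl_range_zeros (k : Nat) (acc : List Char) :
    (List.range k).foldl (fun acc _ => acc ++ ['0']) acc = acc ++ List.replicate k '0' := by
  induction k generalizing acc with
  | zero => simp
  | succ k ih =>
      rw [List.range_succ, List.foldl_append, ih, List.replicate_succ']
      simp

theorem chunks4_append (x y : List Char) (hx : 4 ∣ x.length) :
    chunks4 (x ++ y) = chunks4 x ++ chunks4 y := by
  induction x using chunks4.induct with
  | case1 => simp [chunks4]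
  | case2 a t ih =>
      rcases t with _ | ⟨b, t⟩; · simp at hx
      rcases t with _ | ⟨c, t⟩; · simp at hx
      rcases t with _ | ⟨d, t⟩; · simp at hx
      have ht : 4 ∣ t.length := by simp at hx; omega
      have hd : List.drop 3 (b :: c :: d :: t) = t := rfl
      rw [hd] at ih
      simp only [List.cons_append, chunks4, List.take, List.drop]
      rw [ih ht]

theorem chunks4_spec (p : List Char) :
    chunks4 p = (List.range ((p.length + 3) / 4)).map (fun k => (p.drop (4 * k)).take 4) := by
  induction p using chunks4.induct with
  | case1 => simp [chunks4]
  | case2 a t ih =>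
      have hcnt : ((a :: t).length + 3) / 4 = ((t.drop 3).length + 3) / 4 + 1 := by
        simp only [List.length_cons, List.length_drop]; omega
      rw [chunks4, hcnt, List.range_succ_eq_map, List.map_cons, List.map_map, ih]
      congr 1
      apply List.map_congr_left
      intro k _
      simp only [Function.comp_apply]
      have e1 : List.drop (4 * (k + 1)) (a :: t) = List.drop (4 * k + 3) t := by
        have : 4 * (k + 1) = (4 * k + 3) + 1 := by ring
        rw [this, List.drop_succ_cons]
      have e2 : List.drop (4 * k) (List.drop 3 t) = List.drop (4 * k + 3) t := by
        rw [List.drop_drop, Nat.add_comm]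
      rw [e1, e2]

theorem bchunks (p : List Char) :
    (PySem.List.pyRange 0 (p.length : Int) 4).map
      (fun i => PySem.List.slice p (some i) (some (i + 4))) = chunks4 p := by
  rw [PySem.List.pyRange_of_pos 0 (p.length : Int) (by norm_num), chunks4_spec, List.map_map]
  have hcnt : (if (0:Int) < (p.length : Int) then (((p.length : Int) - 0 + 4 - 1) / 4).toNat else 0)
      = (p.length + 3) / 4 := by
    split_ifs with h
    · omega
    · omega
  rw [hcnt]
  apply List.map_congr_left
  intro k _
  simp only [Function.comp_apply]
  have h1 : (0 : Int) + 4 * (k : Int) = ((4 * k : Nat) : Int) := by push_cast; ring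
  rw [h1]
  have h3 : ((4 * k : Nat) : Int) + 4 = (((4 * k + 4) : Nat) : Int) := by push_cast; ring
  rw [h3, PySem.List.slice_natCast p (4 * k) (4 * k + 4)]
  congr 1
  omega

-- A's space-inserting loop over `enumerate`, on a list whose length is a multiple of 4
theorem outFold (q : List Char) (hq : 4 ∣ q.length) (j : Int) (hj : j % 4 = 0) (acc : List Char) :
    (PySem.List.enumerate q j).foldl
      (fun acc (p : Int × Char) =>
        let acc2 := acc ++ [p.2]
        if PySem.Int.mod (p.1 + 1) 4 = 0 then acc2 ++ [' '] else acc2) acc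
    = acc ++ ((chunks4 q).map (fun g => g ++ [' '])).flatten := by
  induction q using chunks4.induct generalizing j acc with
  | case1 => simp [PySem.List.enumerate, chunks4]
  | case2 a t ih =>
      rcases t with _ | ⟨b, t⟩; · simp at hq
      rcases t with _ | ⟨c, t⟩; · simp at hq
      rcases t with _ | ⟨d, t⟩; · simp at hq
      have ht : 4 ∣ t.length := by simp at hq; omega
      have hd : List.drop 3 (b :: c :: d :: t) = t := rfl
      rw [hd] at ih
      have m1 : PySem.Int.mod (j + 1) 4 = (j + 1) % 4 := PySem.Int.mod_eq_emod_of_pos (by norm_num)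
      have m2 : PySem.Int.mod (j + 1 + 1) 4 = (j + 1 + 1) % 4 := PySem.Int.mod_eq_emod_of_pos (by norm_num)
      have m3 : PySem.Int.mod (j + 1 + 1 + 1) 4 = (j + 1 + 1 + 1) % 4 := PySem.Int.mod_eq_emod_of_pos (by norm_num)
      have m4 : PySem.Int.mod (j + 1 + 1 + 1 + 1) 4 = (j + 1 + 1 + 1 + 1) % 4 := PySem.Int.mod_eq_emod_of_pos (by norm_num)
      have h1 : ¬ ((j + 1) % 4 = 0) := by omega
      have h2 : ¬ ((j + 1 + 1) % 4 = 0) := by omega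
      have h3 : ¬ ((j + 1 + 1 + 1) % 4 = 0) := by omega
      have h4 : (j + 1 + 1 + 1 + 1) % 4 = 0 := by omega
      have IH := ih ht (j + 1 + 1 + 1 + 1) (by omega) (acc ++ [a] ++ [b] ++ [c] ++ [d] ++ [' '])
      simp only [PySem.List.enumerate, List.foldl_cons, m1, m2, m3, m4, h1, h2, h3, h4,
        if_pos, ite_false] at IH ⊢
      rw [IH]
      simp [chunks4]

-- reversing A's grouped-with-trailing-spaces output gives B's groups with leading spaces
theorem revOut (p : List Char) (hp : 4 ∣ p.length) :
    (((chunks4 p.reverse).map (fun g => g ++ [' '])).flatten).reverse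
      = ((chunks4 p).map (fun h => ' ' :: h)).flatten := by
  induction p using chunks4.induct with
  | case1 => simp [chunks4]
  | case2 a t ih =>
      rcases t with _ | ⟨b, t⟩; · simp at hp
      rcases t with _ | ⟨c, t⟩; · simp at hp
      rcases t with _ | ⟨d, t⟩; · simp at hp
      have ht : 4 ∣ t.length := by simp at hp; omega
      have hd : List.drop 3 (b :: c :: d :: t) = t := rfl
      rw [hd] at ih
      have hrev : (a :: b :: c :: d :: t).reverse = t.reverse ++ [d, c, b, a] := by simp
      rw [hrev, chunks4_append _ _ (by simp; omega)]
      have hlast : chunks4 [d, c, b, a] = [[d, c, b, a]] := by simp [chunks4]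
      rw [hlast]
      simp only [List.map_append, List.flatten_append, List.reverse_append, ih ht]
      simp [chunks4]

theorem join_eq_flat (h : List Char) (cs : List (List Char)) :
    PySem.Chars.join [' '] (h :: cs) = h ++ (cs.map (fun g => ' ' :: g)).flatten := by
  induction cs generalizing h with
  | nil => simp [PySem.Chars.join, List.intercalate]
  | cons h2 cs ih =>
      have e : List.intersperse [' '] (h :: h2 :: cs) = h :: [' '] :: List.intersperse [' '] (h2 :: cs) := rfl
      simp only [PySem.Chars.join, List.intercalate] at ih ⊢
      rw [e, List.flatten_cons, List.flatten_cons, ih h2]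
      simp

-- the whole equivalence, as a function of the shared bitstring
theorem bodyEq (s : List Char) :
    (let digits := s.length / 4 * 4 + (if s.length % 4 ≠ 0 then 4 else 0)
     let finalDigits := s.reverse.foldl (fun acc c => acc ++ [c]) ([] : List Char)
     let finalDigits2 := (List.range (digits - finalDigits.length)).foldl (fun acc _ => acc ++ ['0']) finalDigits
     let output := (PySem.List.enumerate finalDigits2).foldl
        (fun acc (p : Int × Char) =>
          let acc2 := acc ++ [p.2]
          if PySem.Int.mod (p.1 + 1) 4 = 0 then acc2 ++ [' '] else acc2) ([] : List Char)
     let rev := output.reverse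
     String.mk (if rev.head? = some ' ' then rev.tail else rev))
    = (let padded := List.replicate (PySem.Int.mod (-(s.length : Int)) 4).toNat '0' ++ s
       String.mk (PySem.Chars.join [' ']
         ((PySem.List.pyRange 0 (padded.length : Int) 4).map
           (fun i => PySem.List.slice padded (some i) (some (i + 4)))))) := by
  simp only []
  have hm : PySem.Int.mod (-(s.length : Int)) 4 = (-(s.length : Int)) % 4 :=
    PySem.Int.mod_eq_emod_of_pos (by norm_num)
  set pad := (PySem.Int.mod (-(s.length : Int)) 4).toNat with hpad
  set n := s.length with hn
  have hdig : n / 4 * 4 + (if n % 4 ≠ 0 then 4 else 0) = n + pad := by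
    rw [hpad, hm]
    split_ifs with h <;> omega
  have hfd : s.reverse.foldl (fun acc c => acc ++ [c]) ([] : List Char) = s.reverse :=
    PySem.List.foldl_append_singleton_eq_self _ _
  rw [hfd, hdig]
  have hlen : s.reverse.length = n := by simp [hn]
  rw [hlen, foldl_range_zeros]
  have hfinal : s.reverse ++ List.replicate (n + pad - n) '0'
      = (List.replicate pad '0' ++ s).reverse := by
    simp only [List.reverse_append, List.reverse_replicate, List.append_cancel_left_eq]
    congr 1
    omega
  rw [hfinal]
  set padded := List.replicate pad '0' ++ s with hpadded
  have hplen : padded.length = n + pad := by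
    simp only [hpadded, List.length_append, List.length_replicate]
    omega
  have hdvd : 4 ∣ padded.length := by
    rw [hplen, hpad, hm]; omega
  have hdvdrev : 4 ∣ padded.reverse.length := by simpa using hdvd
  rw [outFold padded.reverse hdvdrev 0 (by norm_num), List.nil_append, revOut padded hdvd,
    bchunks padded]
  rcases hch : chunks4 padded with _ | ⟨h, cs⟩
  · simp
  · simp only [List.map_cons, List.flatten_cons, List.cons_append, List.head?_cons,
      List.tail_cons]
    rw [join_eq_flat]
    simp

-- ===== VERDICT (by name: the statement is the Claim_ definition above) =====
theorem convert_spec : Claim_equal_convert := by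
  intro num _
  unfold Spec_convert convert convert_alt
  exact bodyEq (PySem.List.slice (PySem.Int.toBinChars0b num) (some 2) none)
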